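-- pv_equiv track=rewrite | github.com/thealper2/codewars-solutions | 7-kyu/simple_fun_38_house_of_cats.py | house_of_cats
-- ===== SOURCE A (Python) =====
-- def house_of_cats(legs):
--     max_people = legs // 2
--     result = []
--     for people in range(max_people + 1):
--         remaining_legs = legs - people * 2
--         if remaining_legs >= 0 and remaining_legs % 4 == 0:
--             result.append(people)
--     return result
-- ===== SOURCE B (Python) =====
-- def house_of_cats(legs):
--     result = []
--     for cats in range(legs // 4, -1, -1):
--         remaining = legs - 4 * cats
--         if remaining % 2 == 0:
--             result.append(remaining // 2)
--     return result
-- ===== Notes on version B (the rewrite author's own statement) =====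
-- stated objective: alternative
-- what changed: Iterates over the number of cats (descending from legs//4) instead of the number of people, emitting people = remaining//2 when the remainder is even; same output order, about half as many loop iterations.
import Mathlib
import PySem

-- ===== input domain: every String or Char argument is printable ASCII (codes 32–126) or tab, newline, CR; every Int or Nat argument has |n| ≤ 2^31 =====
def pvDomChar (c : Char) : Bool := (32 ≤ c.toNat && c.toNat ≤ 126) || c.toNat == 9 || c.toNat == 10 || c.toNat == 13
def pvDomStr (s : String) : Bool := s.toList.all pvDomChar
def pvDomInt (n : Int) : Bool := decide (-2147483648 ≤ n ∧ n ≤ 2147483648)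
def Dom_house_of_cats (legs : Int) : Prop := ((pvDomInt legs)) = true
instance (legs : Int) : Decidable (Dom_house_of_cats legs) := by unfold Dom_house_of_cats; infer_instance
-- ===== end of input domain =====

-- B iterates over the number of cats (descending) instead of the number of people: an alternative decomposition, same results.

-- ===== PORT A =====
def house_of_cats (legs : Int) : List Int :=
  let max_people := PySem.Int.floordiv legs 2
  (PySem.List.pyRange 0 (max_people + 1) 1).foldl
    (fun result people =>
      let remaining_legs := legs - people * 2
      if remaining_legs ≥ 0 ∧ PySem.Int.mod remaining_legs 4 = 0 then result ++ [people] else result)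
    []

-- ===== PORT B =====
def house_of_cats_alt (legs : Int) : List Int :=
  (PySem.List.pyRange (PySem.Int.floordiv legs 4) (-1) (-1)).foldl
    (fun result cats =>
      let remaining := legs - 4 * cats
      if PySem.Int.mod remaining 2 = 0 then result ++ [PySem.Int.floordiv remaining 2] else result)
    []

-- ===== PRECONDITION & SPEC =====
def Spec_house_of_cats (legs : Int) (out : List Int) : Prop := out = house_of_cats_alt legs
instance (legs : Int) (out : List Int) : Decidable (Spec_house_of_cats legs out) := by unfold Spec_house_of_cats; infer_instance

-- ===== CLAIM (what is proved, stated in full; the proofs are below) =====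
def Claim_equal_house_of_cats : Prop := ∀ (legs : Int), Dom_house_of_cats legs → Spec_house_of_cats legs (house_of_cats legs)

-- ===== LEMMAS AND PROOFS =====

-- elements of 0..u-1 congruent to r (mod 2), ascending, as an arithmetic progression
theorem pv_parity_filter (r : Nat) (hr : r ≤ 1) : ∀ (u : Nat),
    (List.range u).filter (fun k => decide (k % 2 = r))
      = (List.range ((u + 1 - r) / 2)).map (fun k => r + 2 * k) := by
  intro u
  induction u with
  | zero => interval_cases r <;> simp
  | succ u ih =>
      rw [List.range_succ, List.filter_append, ih]
      by_cases h : u % 2 = r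
      · have hc : (u + 1 + 1 - r) / 2 = (u + 1 - r) / 2 + 1 := by omega
        have hu : r + 2 * ((u + 1 - r) / 2) = u := by omega
        rw [hc, List.range_succ, List.map_append]
        simp [h, hu]
      · have hc : (u + 1 + 1 - r) / 2 = (u + 1 - r) / 2 := by omega
        simp [h, hc]

theorem house_of_cats_eq_alt (legs : Int) : house_of_cats legs = house_of_cats_alt legs := by
  unfold house_of_cats house_of_cats_alt
  rw [PySem.List.foldl_append_ite (p := fun people =>
        legs - people * 2 ≥ 0 ∧ PySem.Int.mod (legs - people * 2) 4 = 0) (f := fun people => people),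
      PySem.List.foldl_append_ite (p := fun cats => PySem.Int.mod (legs - 4 * cats) 2 = 0)
        (f := fun cats => PySem.Int.floordiv (legs - 4 * cats) 2)]
  simp only [List.nil_append, List.map_id']
  rcases lt_or_ge legs 0 with hneg | hpos
  · -- both ranges are empty
    rw [PySem.List.pyRange_one_eq_nil (by
        have := PySem.Int.floordiv_eq_ediv_of_pos (a := legs) (b := 2) (by norm_num); omega),
        PySem.List.pyRange_neg_one_eq_nil (by
        have := PySem.Int.floordiv_eq_ediv_of_pos (a := legs) (b := 4) (by norm_num); omega)]
    simp
  · have h2 := PySem.Int.floordiv_eq_ediv_of_pos (a := legs) (b := 2) (by norm_num)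
    have h4 := PySem.Int.floordiv_eq_ediv_of_pos (a := legs) (b := 4) (by norm_num)
    rw [h2, h4, PySem.List.pyRange_one, PySem.List.pyRange_neg_one]
    simp only [zero_add]
    rw [List.filter_map, List.filter_map]
    rcases Int.emod_two_eq legs with heven | hodd
    · -- legs even: A filters by people's parity, B keeps every cat count
      have hB : List.filter ((fun x => decide (PySem.Int.mod (legs - 4 * x) 2 = 0)) ∘
            (fun k : Nat => legs / 4 - (k : Int))) (List.range (legs / 4 - -1).toNat)
          = List.range (legs / 4 - -1).toNat := by
        apply List.filter_eq_self.mpr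
        intro k _
        simp only [Function.comp_apply]
        rw [PySem.Int.mod_eq_emod_of_pos (by norm_num)]
        simp only [decide_eq_true_eq]
        omega
      have hA : List.filter ((fun x => decide (legs - x * 2 ≥ 0 ∧ PySem.Int.mod (legs - x * 2) 4 = 0)) ∘
            (fun k : Nat => (k : Int))) (List.range (legs / 2 + 1 - 0).toNat)
          = List.filter (fun k => decide (k % 2 = (legs % 4 / 2).toNat))
              (List.range (legs / 2 + 1 - 0).toNat) := by
        apply List.filter_congr
        intro x hx
        simp only [List.mem_range] at hx
        simp only [Function.comp_apply]
        rw [PySem.Int.mod_eq_emod_of_pos (by norm_num), decide_eq_decide]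
        omega
      rw [hA, hB, pv_parity_filter (legs % 4 / 2).toNat (by omega)]
      rw [List.map_map, List.map_map]
      have hlen : ((legs / 2 + 1 - 0).toNat + 1 - (legs % 4 / 2).toNat) / 2
          = (legs / 4 - -1).toNat := by omega
      rw [hlen]
      apply List.map_congr_left
      intro k hk
      simp only [List.mem_range] at hk
      simp only [Function.comp_apply]
      rw [PySem.Int.floordiv_eq_ediv_of_pos (by norm_num)]
      omega
    · -- legs odd: both filters are empty
      have hA : List.filter ((fun x => decide (legs - x * 2 ≥ 0 ∧ PySem.Int.mod (legs - x * 2) 4 = 0)) ∘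
            (fun k : Nat => (k : Int))) (List.range (legs / 2 + 1 - 0).toNat) = [] := by
        apply List.filter_eq_nil_iff.mpr
        intro a _
        simp only [Function.comp_apply, decide_eq_true_eq, not_and]
        rw [PySem.Int.mod_eq_emod_of_pos (by norm_num)]
        omega
      have hB : List.filter ((fun x => decide (PySem.Int.mod (legs - 4 * x) 2 = 0)) ∘
            (fun k : Nat => legs / 4 - (k : Int))) (List.range (legs / 4 - -1).toNat) = [] := by
        apply List.filter_eq_nil_iff.mpr
        intro a _
        simp only [Function.comp_apply, decide_eq_true_eq]
        rw [PySem.Int.mod_eq_emod_of_pos (by norm_num)]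
        omega
      rw [hA, hB]
      simp

-- ===== VERDICT (by name: the statement is the Claim_ definition above) =====
theorem house_of_cats_spec : Claim_equal_house_of_cats := by
  intro legs _
  unfold Spec_house_of_cats
  exact house_of_cats_eq_alt legs
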